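-- pv_equiv track=rewrite | github.com/AreteDriver/Dossier | dossier/ingestion/email_parser.py | _guess_subject
-- ===== SOURCE A (Python) =====
-- def _guess_subject(text: str) -> str:
--     """Guess a subject line from text content."""
--     lines = text.strip().split("\n")
--     for line in lines[:5]:
--         line = line.strip()
--         if line.startswith("Subject:"):
--             return line[8:].strip()
--         if line.startswith("Re:") or line.startswith("Fwd:"):
--             return line.strip()
--     # First non-empty short line
--     for line in lines[:10]:
--         line = line.strip()
--         if 5 < len(line) < 100:
--             return line
--     return "Untitled Email"
-- ===== SOURCE B (Python) =====
-- def _guess_subject(text: str) -> str: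
--     """Guess a subject line from text content."""
--     candidate = None
--     for i, line in enumerate(text.strip().split("\n")[:10]):
--         line = line.strip()
--         if i < 5:
--             if line.startswith("Subject:"):
--                 return line[8:].strip()
--             if line.startswith("Re:") or line.startswith("Fwd:"):
--                 return line
--         if candidate is None and 5 < len(line) < 100:
--             candidate = line
--     return candidate if candidate is not None else "Untitled Email"
-- ===== Notes on version B (the rewrite author's own statement) =====
-- stated objective: alternative
-- what changed: A's two sequential passes (a prefix scan over lines[:5], then a short-line scan over lines[:10]) are merged into one enumerated loop over lines[:10] that returns prefix matches eagerly for i < 5 and carries the first short line as a candidate emitted only at loop end.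
import Mathlib
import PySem

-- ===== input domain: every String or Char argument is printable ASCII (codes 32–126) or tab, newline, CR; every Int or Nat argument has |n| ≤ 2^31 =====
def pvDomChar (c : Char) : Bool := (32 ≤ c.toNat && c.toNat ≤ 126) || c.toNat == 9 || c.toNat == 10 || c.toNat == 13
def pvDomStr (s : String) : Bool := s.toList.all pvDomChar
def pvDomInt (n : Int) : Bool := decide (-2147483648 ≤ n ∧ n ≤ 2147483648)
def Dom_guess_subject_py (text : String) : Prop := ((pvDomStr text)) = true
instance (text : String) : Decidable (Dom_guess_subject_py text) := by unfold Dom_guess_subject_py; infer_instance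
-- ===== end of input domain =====

-- B merges A's two sequential passes (prefix scan of lines[:5], then short-line scan of
-- lines[:10]) into one indexed loop carrying a first-short-line candidate; same return value.

-- ===== PORT A =====
-- first loop: for line in lines[:5] — returns the subject on a prefix match
def guessSubjPrefixLoop : List String → Option String
  | [] => none
  | l :: rest =>
    let line := PySem.Str.strip l
    if PySem.Str.startswith line "Subject:" then
      some (PySem.Str.strip (PySem.Str.slice line (some 8) none))
    else if PySem.Str.startswith line "Re:" || PySem.Str.startswith line "Fwd:" then
      some (PySem.Str.strip line)
    else guessSubjPrefixLoop rest

-- second loop: for line in lines[:10] — first non-empty short line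
def guessSubjShortLoop : List String → Option String
  | [] => none
  | l :: rest =>
    let line := PySem.Str.strip l
    if 5 < PySem.Str.len line ∧ PySem.Str.len line < 100 then some line
    else guessSubjShortLoop rest

def guess_subject_py (text : String) : String :=
  let lines := (PySem.Str.split? (PySem.Str.strip text) "\n").getD []
  match guessSubjPrefixLoop (lines.take 5) with
  | some r => r
  | none =>
    match guessSubjShortLoop (lines.take 10) with
    | some r => r
    | none => "Untitled Email"

-- ===== PORT B =====
-- single loop: for i, line in enumerate(lines[:10]) with a short-line candidate accumulator
def guessSubjOneLoop (i : Nat) (cand : Option String) : List String → String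
  | [] => cand.getD "Untitled Email"
  | l :: rest =>
    let line := PySem.Str.strip l
    if i < 5 ∧ PySem.Str.startswith line "Subject:" then
      PySem.Str.strip (PySem.Str.slice line (some 8) none)
    else if i < 5 ∧ (PySem.Str.startswith line "Re:" || PySem.Str.startswith line "Fwd:") then
      line
    else
      guessSubjOneLoop (i + 1)
        (if cand = none ∧ 5 < PySem.Str.len line ∧ PySem.Str.len line < 100 then some line
         else cand) rest

def guess_subject_py_alt (text : String) : String :=
  guessSubjOneLoop 0 none
    (((PySem.Str.split? (PySem.Str.strip text) "\n").getD []).take 10)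

-- ===== PRECONDITION & SPEC =====
def Spec_guess_subject_py (text : String) (out : String) : Prop := out = guess_subject_py_alt text
instance (text : String) (out : String) : Decidable (Spec_guess_subject_py text out) := by unfold Spec_guess_subject_py; infer_instance

-- ===== CLAIM (what is proved, stated in full; the proofs are below) =====
def Claim_equal_guess_subject_py : Prop := ∀ (text : String), Dom_guess_subject_py text → Spec_guess_subject_py text (guess_subject_py text)

-- ===== LEMMAS AND PROOFS =====

-- strip is idempotent (needed because A re-strips an already-stripped line in the Re:/Fwd: branch)
theorem pvLstripPrefix (u t : List Char) (hp : u <+: t) (ht : PySem.Chars.lstrip t = t) :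
    PySem.Chars.lstrip u = u := by
  cases u with
  | nil => rfl
  | cons c u' =>
    obtain ⟨v, hv⟩ := hp
    have hc : PySem.Chars.isspace c = false := by
      by_contra hcc
      have hc' : PySem.Chars.isspace c = true := by
        cases hcase : PySem.Chars.isspace c
        · exact absurd hcase hcc
        · rfl
      rw [← hv] at ht
      rw [List.cons_append] at ht
      rw [PySem.Chars.lstrip, List.dropWhile_cons, hc'] at ht
      simp only [if_true] at ht
      have hlen := List.length_dropWhile_le PySem.Chars.isspace (u' ++ v)
      have : (List.dropWhile PySem.Chars.isspace (u' ++ v)).length = (c :: (u' ++ v)).length := by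
        rw [ht]
      simp only [List.length_cons] at this
      omega
    rw [PySem.Chars.lstrip, List.dropWhile_cons, hc]
    simp

theorem pvStripIdemChars (s : List Char) :
    PySem.Chars.strip (PySem.Chars.strip s) = PySem.Chars.strip s := by
  unfold PySem.Chars.strip
  have hts : PySem.Chars.lstrip (PySem.Chars.lstrip s) = PySem.Chars.lstrip s :=
    List.dropWhile_idempotent _ _
  have hsuf : List.dropWhile PySem.Chars.isspace (PySem.Chars.lstrip s).reverse <:+
      (PySem.Chars.lstrip s).reverse := List.dropWhile_suffix _
  have hpre : PySem.Chars.rstrip (PySem.Chars.lstrip s) <+: PySem.Chars.lstrip s := by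
    rw [PySem.Chars.rstrip]
    rw [← List.reverse_reverse (PySem.Chars.lstrip s)]
    exact List.reverse_prefix.mpr (by rw [List.reverse_reverse]; exact hsuf)
  rw [pvLstripPrefix _ _ hpre hts]
  rw [PySem.Chars.rstrip, PySem.Chars.rstrip, List.reverse_reverse, List.dropWhile_idempotent]

theorem pvStripIdem (s : String) :
    PySem.Str.strip (PySem.Str.strip s) = PySem.Str.strip s := by
  have h : (PySem.Str.strip (PySem.Str.strip s)).toList = (PySem.Str.strip s).toList := by
    simp [pvStripIdemChars]
  exact String.toList_inj.mp h

-- the one-pass loop equals A's two-pass structure, for any start index i and pending candidate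
set_option maxHeartbeats 1000000 in
theorem guessSubjOneLoop_eq (ls : List String) : ∀ (i : Nat) (cand : Option String),
    guessSubjOneLoop i cand ls =
      match guessSubjPrefixLoop (ls.take (5 - i)) with
      | some r => r
      | none => ((cand.or (guessSubjShortLoop ls)).getD "Untitled Email") := by
  induction ls with
  | nil =>
    intro i cand
    cases cand <;> simp [guessSubjOneLoop, guessSubjPrefixLoop, guessSubjShortLoop]
  | cons l rest ih =>
    intro i cand
    by_cases hi : i < 5
    · have h5 : 5 - i = (4 - i) + 1 := by omega
      rw [h5, List.take_succ_cons]
      simp only [guessSubjOneLoop, guessSubjPrefixLoop]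
      by_cases h1 : PySem.Str.startswith (PySem.Str.strip l) "Subject:" = true
      · simp only [hi, h1, true_and, if_true]
      · by_cases h2 : (PySem.Str.startswith (PySem.Str.strip l) "Re:"
            || PySem.Str.startswith (PySem.Str.strip l) "Fwd:") = true
        · simp only [hi, h1, h2, true_and, Bool.false_eq_true, if_false, if_true]
          rw [pvStripIdem]
        · simp only [hi, h1, h2, true_and, Bool.false_eq_true, if_false]
          rw [ih (i + 1)]
          have h4 : 4 - i = 5 - (i + 1) := by omega
          rw [h4]
          cases hm : guessSubjPrefixLoop (rest.take (5 - (i + 1))) with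
          | some r => rfl
          | none =>
            cases cand with
            | some c => rfl
            | none =>
              simp only [guessSubjShortLoop, Option.none_or, true_and]
              by_cases hs : 5 < PySem.Str.len (PySem.Str.strip l) ∧
                  PySem.Str.len (PySem.Str.strip l) < 100
              · rw [if_pos hs, if_pos hs]; rfl
              · rw [if_neg hs, if_neg hs]; cases guessSubjShortLoop rest <;> rfl
    · have h5 : 5 - i = 0 := by omega
      have h5' : 5 - (i + 1) = 0 := by omega
      simp only [guessSubjOneLoop, h5, List.take_zero, guessSubjPrefixLoop, hi, false_and,
        if_false]
      rw [ih (i + 1), h5']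
      simp only [List.take_zero, guessSubjPrefixLoop]
      cases cand with
      | some c => rfl
      | none =>
        simp only [guessSubjShortLoop, Option.none_or, true_and]
        by_cases hs : 5 < PySem.Str.len (PySem.Str.strip l) ∧
            PySem.Str.len (PySem.Str.strip l) < 100
        · rw [if_pos hs, if_pos hs]; rfl
        · rw [if_neg hs, if_neg hs]; cases guessSubjShortLoop rest <;> rfl

-- ===== VERDICT (by name: the statement is the Claim_ definition above) =====
theorem guess_subject_py_spec : Claim_equal_guess_subject_py := by
  intro text _
  unfold Spec_guess_subject_py guess_subject_py guess_subject_py_alt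
  rw [guessSubjOneLoop_eq]
  generalize (PySem.Str.split? (PySem.Str.strip text) "\n").getD [] = lines
  rw [Nat.sub_zero, List.take_take]
  norm_num
  cases guessSubjPrefixLoop (lines.take 5) with
  | some r => simp
  | none =>
    cases guessSubjShortLoop (lines.take 10) <;> simp
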